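-- pv_equiv track=rewrite | github.com/RhoA1as/LeetcodePractice | Leetcodepy/leetcode2.py | maxEqualFreq
-- ===== SOURCE A (Python) =====
-- from collections import Counter
-- from typing import List, Optional
--
-- def maxEqualFreq(nums: List[int]) -> int:
--     count, freq = Counter(), Counter()
--     ans = max_freq = 0
--     for i, num in enumerate(nums):
--         if count[num]:
--             freq[count[num]] -= 1
--         count[num] += 1
--         freq[count[num]] += 1
--         max_freq = max(max_freq, count[num])
--         if max_freq == 1 \
--                 or freq[max_freq] * max_freq == i \
--                 or (freq[max_freq - 1] * (max_freq - 1) + freq[max_freq] * max_freq == i + 1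
--                     and freq[max_freq] == 1):
--             ans = max(ans, i + 1)
--     return ans
-- ===== SOURCE B (Python) =====
-- def maxEqualFreq(nums):
--     ans = 0
--     for L in range(1, len(nums) + 1):
--         c = {}
--         for x in nums[:L]:
--             c[x] = c.get(x, 0) + 1
--         dist = {}
--         for v in c.values():
--             dist[v] = dist.get(v, 0) + 1
--         ks = sorted(dist)
--         if len(ks) == 1:
--             v = ks[0]
--             ok = v == 1 or dist[v] == 1
--         elif len(ks) == 2:
--             a, b = ks
--             ok = (a == 1 and dist[a] == 1) or (b == a + 1 and dist[b] == 1)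
--         else:
--             ok = False
--         if ok:
--             ans = L
--     return ans
-- ===== Notes on version B (the rewrite author's own statement) =====
-- stated objective: alternative
-- what changed: B rebuilds the count distribution of each prefix from scratch and decides validity by a case analysis on the sorted distinct count values (one value: all-ones or single element; two values: a removable singleton 1 or a unique top count one above the rest), replacing A's incremental count/freq/max_freq bookkeeping in a single pass.
import Mathlib
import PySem

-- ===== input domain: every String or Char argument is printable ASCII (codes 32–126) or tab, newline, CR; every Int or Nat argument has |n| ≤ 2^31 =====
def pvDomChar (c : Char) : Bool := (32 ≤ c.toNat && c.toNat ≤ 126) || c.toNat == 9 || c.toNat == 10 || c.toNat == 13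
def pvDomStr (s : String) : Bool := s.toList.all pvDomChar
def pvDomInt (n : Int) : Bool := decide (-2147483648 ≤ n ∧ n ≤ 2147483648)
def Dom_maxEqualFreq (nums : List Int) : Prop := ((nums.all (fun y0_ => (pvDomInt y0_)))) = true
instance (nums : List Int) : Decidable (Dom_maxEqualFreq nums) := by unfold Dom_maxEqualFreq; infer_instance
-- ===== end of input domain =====

-- B re-derives each prefix's count distribution from scratch and decides validity by a
-- case analysis on its sorted distinct count values, instead of A's incremental
-- count/freq/max_freq bookkeeping; alternative decomposition, O(n^2) vs A's O(n).

-- ===== PORT A =====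
def maxEqualFreq (nums : List Int) : Int :=
  let st :=
    (PySem.List.enumerate nums 0).foldl
      (fun (st : PySem.Dict Int Int × PySem.Dict Int Int × Int × Int) p =>
        let count := st.1
        let freq := st.2.1
        let max_freq := st.2.2.1
        let ans := st.2.2.2
        let i := p.1
        let num := p.2
        let freq := if count.getD num 0 ≠ 0 then freq.modify (count.getD num 0) 0 (· - 1) else freq
        let count := count.modify num 0 (· + 1)
        let freq := freq.modify (count.getD num 0) 0 (· + 1)
        let max_freq := max max_freq (count.getD num 0)
        let ans :=
          if max_freq = 1 ∨ freq.getD max_freq 0 * max_freq = i ∨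
              (freq.getD (max_freq - 1) 0 * (max_freq - 1) + freq.getD max_freq 0 * max_freq = i + 1 ∧
               freq.getD max_freq 0 = 1) then
            max ans (i + 1)
          else ans
        (count, freq, max_freq, ans))
      (PySem.Dict.empty, PySem.Dict.empty, 0, 0)
  st.2.2.2

-- ===== PORT B =====
def maxEqualFreq_alt (nums : List Int) : Int :=
  (PySem.List.pyRange 1 ((nums.length : Int) + 1) 1).foldl
    (fun ans L =>
      let c : PySem.Dict Int Int :=
        (PySem.List.slice nums none (some L)).foldl
          (fun d x => d.insert x (d.getD x 0 + 1)) PySem.Dict.empty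
      let dist : PySem.Dict Int Int :=
        c.values.foldl (fun d v => d.insert v (d.getD v 0 + 1)) PySem.Dict.empty
      let ks := PySem.List.sorted dist.keys (fun x => x) false
      let ok : Bool :=
        match ks with
        | [v] => (v == 1) || (dist.getD v 0 == 1)
        | [a, b] => ((a == 1) && (dist.getD a 0 == 1)) || ((b == a + 1) && (dist.getD b 0 == 1))
        | _ => false
      if ok then L else ans)
    0

-- ===== PRECONDITION & SPEC =====
def Spec_maxEqualFreq (nums : List Int) (out : Int) : Prop := out = maxEqualFreq_alt nums
instance (nums : List Int) (out : Int) : Decidable (Spec_maxEqualFreq nums out) := by unfold Spec_maxEqualFreq; infer_instance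

-- ===== CLAIM (what is proved, stated in full; the proofs are below) =====
def Claim_equal_maxEqualFreq : Prop := ∀ (nums : List Int), Dom_maxEqualFreq nums → Spec_maxEqualFreq nums (maxEqualFreq nums)


-- ===== LEMMAS AND PROOFS =====

-- Abbreviations used by the proofs (not by the ports/claim).
def cntI (q : List Int) (k : Int) : Int := (q.count k : Int)

-- counts of the distinct elements of q, in first-occurrence order
def csL (q : List Int) : List Int := (PySem.Set.ofList q).map (fun y => (q.count y : Int))

def FF (q : List Int) (v : Int) : Int := ((csL q).count v : Int)

def MxL (q : List Int) : Int := (csL q).foldl max 0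

-- the per-prefix validity test of port B, as a function of the prefix
def okBfun (p : List Int) : Bool :=
  let c : PySem.Dict Int Int :=
    p.foldl (fun d x => d.insert x (d.getD x 0 + 1)) PySem.Dict.empty
  let dist : PySem.Dict Int Int :=
    c.values.foldl (fun d v => d.insert v (d.getD v 0 + 1)) PySem.Dict.empty
  let ks := PySem.List.sorted dist.keys (fun x => x) false
  match ks with
  | [v] => (v == 1) || (dist.getD v 0 == 1)
  | [a, b] => ((a == 1) && (dist.getD a 0 == 1)) || ((b == a + 1) && (dist.getD b 0 == 1))
  | _ => false

-- the loop body of port A, named for the induction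
def stepA (st : PySem.Dict Int Int × PySem.Dict Int Int × Int × Int) (p : Int × Int) :
    PySem.Dict Int Int × PySem.Dict Int Int × Int × Int :=
  let count := st.1
  let freq := st.2.1
  let max_freq := st.2.2.1
  let ans := st.2.2.2
  let i := p.1
  let num := p.2
  let freq := if count.getD num 0 ≠ 0 then freq.modify (count.getD num 0) 0 (· - 1) else freq
  let count := count.modify num 0 (· + 1)
  let freq := freq.modify (count.getD num 0) 0 (· + 1)
  let max_freq := max max_freq (count.getD num 0)
  let ans :=
    if max_freq = 1 ∨ freq.getD max_freq 0 * max_freq = i ∨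
        (freq.getD (max_freq - 1) 0 * (max_freq - 1) + freq.getD max_freq 0 * max_freq = i + 1 ∧
         freq.getD max_freq 0 = 1) then
      max ans (i + 1)
    else ans
  (count, freq, max_freq, ans)

def runA (q : List Int) : PySem.Dict Int Int × PySem.Dict Int Int × Int × Int :=
  (PySem.List.enumerate q 0).foldl stepA (PySem.Dict.empty, PySem.Dict.empty, 0, 0)

lemma maxEqualFreq_eq_runA (nums : List Int) : maxEqualFreq nums = (runA nums).2.2.2 := rfl

lemma alt_unfold (nums : List Int) :
    maxEqualFreq_alt nums =
      (PySem.List.pyRange 1 ((nums.length : Int) + 1) 1).foldl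
        (fun ans L => if okBfun (PySem.List.slice nums none (some L)) then L else ans) 0 := rfl

-- ----- basic facts about csL / FF / MxL -----

lemma mem_csL {q : List Int} {v : Int} : v ∈ csL q ↔ ∃ y ∈ q, cntI q y = v := by
  simp [csL, cntI, PySem.Set.mem_ofList]

lemma csL_pos {q : List Int} {v : Int} (hv : v ∈ csL q) : 1 ≤ v := by
  rcases mem_csL.mp hv with ⟨y, hy, rfl⟩
  have : 0 < q.count y := List.count_pos_iff.mpr hy
  simp only [cntI]
  omega

lemma cntI_append (q : List Int) (x k : Int) :
    cntI (q ++ [x]) k = cntI q k + (if k = x then 1 else 0) := by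
  simp only [cntI, List.count_append]
  by_cases h : k = x
  · subst h; simp
  · have hxk : ¬ x = k := fun hh => h hh.symm
    simp [List.count_singleton, h, hxk]

lemma cntI_nonneg (q : List Int) (k : Int) : 0 ≤ cntI q k := Int.natCast_nonneg _

lemma cntI_ne_zero_iff (q : List Int) (x : Int) : cntI q x ≠ 0 ↔ x ∈ q := by
  simp only [cntI]
  rw [← List.count_pos_iff (l := q) (a := x)]
  omega

-- decomposition of csL (q ++ [x])
lemma count_append_singleton_of_ne {q : List Int} {x y : Int} (h : y ≠ x) :
    (q ++ [x]).count y = q.count y := by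
  have hxy : ¬ y = x := h
  have hyx : ¬ x = y := fun hh => h hh.symm
  simp [List.count_append, List.count_singleton, hxy, hyx]

lemma count_append_singleton_self (q : List Int) (x : Int) :
    (q ++ [x]).count x = q.count x + 1 := by
  simp [List.count_append]

lemma csL_append_of_not_mem {q : List Int} {x : Int} (hx : x ∉ q) :
    csL (q ++ [x]) = csL q ++ [1] := by
  have h1 : PySem.Set.ofList (q ++ [x]) = PySem.Set.ofList q ++ [x] := by
    rw [PySem.Set.ofList_append_singleton,
      PySem.Set.add_of_not_mem (by simpa [PySem.Set.mem_ofList] using hx)]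
  simp only [csL, h1, List.map_append, List.map_cons, List.map_nil]
  congr 1
  · apply List.map_congr_left
    intro y hy
    have hyq : y ∈ q := (PySem.Set.mem_ofList _ _).mp hy
    have hyx : y ≠ x := fun hh => hx (hh ▸ hyq)
    rw [count_append_singleton_of_ne hyx]
  · rw [count_append_singleton_self, List.count_eq_zero.mpr hx]
    norm_num

lemma csL_append_of_mem {q : List Int} {x : Int} (hx : x ∈ q) :
    ∃ l1 l2, csL (q ++ [x]) = l1 ++ (cntI q x + 1) :: l2 ∧ csL q = l1 ++ cntI q x :: l2 := by
  have h1 : PySem.Set.ofList (q ++ [x]) = PySem.Set.ofList q := by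
    rw [PySem.Set.ofList_append_singleton,
      PySem.Set.add_of_mem (by simpa [PySem.Set.mem_ofList] using hx)]
  have hxs : x ∈ PySem.Set.ofList q := (PySem.Set.mem_ofList _ _).mpr hx
  rcases List.append_of_mem hxs with ⟨s, t, hst⟩
  have hnd : (s ++ x :: t).Nodup := hst ▸ PySem.Set.nodup_ofList q
  have hxs' : x ∉ s := by
    intro hmem
    exact (List.disjoint_of_nodup_append hnd) hmem List.mem_cons_self
  have hxt : x ∉ t := by
    have := (List.nodup_append.mp hnd).2.1
    exact (List.nodup_cons.mp this).1
  refine ⟨s.map (fun y => (q.count y : Int)), t.map (fun y => (q.count y : Int)), ?_, ?_⟩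
  · simp only [csL, h1, hst, List.map_append, List.map_cons]
    congr 1
    · apply List.map_congr_left
      intro y hy
      exact congrArg _ (count_append_singleton_of_ne (fun hh => hxs' (hh ▸ hy)))
    · congr 1
      · rw [count_append_singleton_self]
        push_cast [cntI]
        ring
      · apply List.map_congr_left
        intro y hy
        exact congrArg _ (count_append_singleton_of_ne (fun hh => hxt (hh ▸ hy)))
  · simp [csL, hst, cntI]

lemma FF_append (q : List Int) (x : Int) (v : Int) :
    FF (q ++ [x]) v =
      FF q v + (if v = cntI q x + 1 then 1 else 0) - (if v = cntI q x ∧ x ∈ q then 1 else 0) := by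
  by_cases hx : x ∈ q
  · rcases csL_append_of_mem hx with ⟨l1, l2, h1, h2⟩
    simp only [FF, h1, h2, List.count_append, List.count_cons]
    have hne : cntI q x + 1 ≠ cntI q x := by omega
    by_cases hv1 : v = cntI q x + 1
    · have hv2 : ¬ v = cntI q x := by omega
      have e1 : (v == cntI q x + 1) = true := by simp [hv1]
      have e2 : (v == cntI q x) = false := by simp [hv2]
      simp [e1, e2, hv1, hv2, hx]
      push_cast
      ring
    · by_cases hv2 : v = cntI q x
      · have e1 : (v == cntI q x + 1) = false := by simp [hv1]
        have e2 : (v == cntI q x) = true := by simp [hv2]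
        simp [e1, e2, hv1, hv2, hx]
        push_cast
        ring
      · have e1 : (v == cntI q x + 1) = false := by simp [hv1]
        have e2 : (v == cntI q x) = false := by simp [hv2]
        have hv1' : ¬ cntI q x + 1 = v := fun hh => hv1 hh.symm
        have hv2' : ¬ cntI q x = v := fun hh => hv2 hh.symm
        simp [e1, e2, hv1, hv2, hv1', hv2']
  · have hc0 : cntI q x = 0 := by
      simp [cntI, List.count_eq_zero.mpr hx]
    simp only [FF]
    rw [csL_append_of_not_mem hx]
    simp only [List.count_append, List.count_singleton, hc0, hx, and_false, if_false]
    by_cases hv : v = 1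
    · simp [hv]
    · have hv' : (v == 1) = false := by simp [hv]
      have hv'' : ¬ (1 : Int) = v := fun hh => hv hh.symm
      simp [hv, hv', hv'']

lemma csL_sum (q : List Int) : (csL q).sum = (q.length : Int) := by
  induction q using List.reverseRecOn with
  | nil => simp [csL, PySem.Set.ofList]
  | append_singleton q x ih =>
    by_cases hx : x ∈ q
    · rcases csL_append_of_mem hx with ⟨l1, l2, h1, h2⟩
      have h3 : (csL q).sum = l1.sum + (cntI q x + l2.sum) := by
        rw [h2]; simp
      rw [h1]
      simp only [List.sum_append, List.sum_cons, List.length_append, List.length_singleton]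
      push_cast
      omega
    · rw [csL_append_of_not_mem hx]
      simp only [List.sum_append, List.sum_cons, List.sum_nil, List.length_append,
        List.length_singleton, ih]
      push_cast
      omega

-- foldl max helpers
lemma le_foldl_max_init (l : List Int) (a : Int) : a ≤ l.foldl max a := by
  induction l generalizing a with
  | nil => simp
  | cons b l ih => exact le_trans (le_max_left a b) (ih (max a b))

lemma le_foldl_max {l : List Int} {v : Int} (hv : v ∈ l) (a : Int) : v ≤ l.foldl max a := by
  induction l generalizing a with
  | nil => simp at hv
  | cons b l ih =>
    rcases List.mem_cons.mp hv with rfl | h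
    · exact le_trans (le_max_right a v) (le_foldl_max_init l (max a v))
    · exact ih h (max a b)

lemma foldl_max_le {l : List Int} {a m : Int} (ha : a ≤ m) (h : ∀ v ∈ l, v ≤ m) :
    l.foldl max a ≤ m := by
  induction l generalizing a with
  | nil => simpa using ha
  | cons b l ih =>
    exact ih (max_le ha (h b (List.mem_cons_self))) (fun v hv => h v (List.mem_cons_of_mem _ hv))

lemma foldl_max_mem (l : List Int) (a : Int) : l.foldl max a = a ∨ l.foldl max a ∈ l := by
  induction l generalizing a with
  | nil => left; rfl
  | cons b l ih =>
    simp only [List.foldl_cons]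
    rcases ih (max a b) with h | h
    · rcases max_cases a b with ⟨h1, _⟩ | ⟨h1, _⟩
      · left; rw [h1] at h ⊢; exact h
      · right; rw [h1] at h ⊢; rw [h]; exact List.mem_cons_self
    · right; exact List.mem_cons_of_mem _ h

lemma MxL_nonneg (q : List Int) : 0 ≤ MxL q := le_foldl_max_init _ _

lemma le_MxL {q : List Int} {v : Int} (hv : v ∈ csL q) : v ≤ MxL q := le_foldl_max hv 0

lemma MxL_mem {q : List Int} (hq : q ≠ []) : MxL q ∈ csL q := by
  rcases foldl_max_mem (csL q) 0 with h | h
  · exfalso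
    rcases List.exists_mem_of_ne_nil q hq with ⟨y, hy⟩
    have h1 : cntI q y ∈ csL q := mem_csL.mpr ⟨y, hy, rfl⟩
    have h2 : cntI q y ≤ (csL q).foldl max 0 := le_foldl_max h1 0
    have h3 := csL_pos h1
    have h4 : (csL q).foldl max 0 = 0 := h
    omega
  · exact h

lemma MxL_append (q : List Int) (x : Int) :
    MxL (q ++ [x]) = max (MxL q) (cntI q x + 1) := by
  apply le_antisymm
  · apply foldl_max_le (le_max_of_le_left (MxL_nonneg q))
    intro v hv
    rcases mem_csL.mp hv with ⟨y, hy, rfl⟩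
    by_cases hyx : y = x
    · subst hyx
      rw [cntI_append]
      simp only [if_pos rfl]
      exact le_max_right _ _
    · have hyq : y ∈ q := by
        rcases List.mem_append.mp hy with h | h
        · exact h
        · simp at h; exact absurd h hyx
      rw [cntI_append]
      simp only [hyx, if_false]
      have := le_MxL (mem_csL.mpr ⟨y, hyq, rfl⟩)
      have h0 : cntI q y + 0 = cntI q y := by ring
      rw [h0]
      exact le_max_of_le_left this
  · apply max_le
    · by_cases hq : q = []
      · subst hq
        simp only [MxL, csL, PySem.Set.ofList, List.map_nil, List.foldl_nil]
        exact MxL_nonneg _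
      · have h1 := MxL_mem hq
        rcases mem_csL.mp h1 with ⟨y, hy, hcy⟩
        have h2 : cntI (q ++ [x]) y ∈ csL (q ++ [x]) :=
          mem_csL.mpr ⟨y, List.mem_append.mpr (Or.inl hy), rfl⟩
        have h3 := le_MxL h2
        rw [cntI_append] at h3
        rw [← hcy]
        split at h3 <;> omega
    · have h2 : cntI (q ++ [x]) x ∈ csL (q ++ [x]) :=
        mem_csL.mpr ⟨x, List.mem_append.mpr (Or.inr List.mem_cons_self), rfl⟩
      have h3 := le_MxL h2
      rw [cntI_append] at h3
      simpa using h3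

-- ----- sum decompositions -----

lemma sum_decomp (l : List Int) (a : Int) :
    l.sum = a * (l.count a : Int) + (l.filter (fun x => x != a)).sum := by
  induction l with
  | nil => simp
  | cons b l ih =>
    simp only [List.sum_cons, List.count_cons, List.filter_cons]
    by_cases h : b = a
    · subst h
      simp only [BEq.rfl, bne_self_eq_false, Bool.false_eq_true, if_true, if_false]
      rw [ih]
      push_cast
      ring
    · have hs : ¬ a = b := fun hh => h hh.symm
      simp only [beq_iff_eq, bne_iff_ne, ne_eq, hs, h, if_false, if_true, not_false_iff,
        List.sum_cons]
      rw [ih]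
      push_cast
      ring

lemma count_filter_ne {l : List Int} {a b : Int} (h : b ≠ a) :
    (l.filter (fun x => x != a)).count b = l.count b := by
  induction l with
  | nil => rfl
  | cons c l ih =>
    simp only [List.filter_cons]
    by_cases hc : c = a
    · subst hc
      have hcb : ¬ c = b := fun hh => h hh.symm
      simp [List.count_cons, ih, hcb]
    · simp [hc, List.count_cons, ih]

lemma list_sum_nonneg {l : List Int} (h : ∀ x ∈ l, 0 ≤ x) : 0 ≤ l.sum :=
  List.sum_nonneg h

-- ----- the condition equivalence -----

lemma int_mul_eq_one {a b : Int} (ha : 1 ≤ a) (hb : 1 ≤ b) (h : a * b = 1) :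
    a = 1 ∧ b = 1 := by
  constructor <;> nlinarith

lemma count_pos_int {cs : List Int} {v : Int} (hv : v ∈ cs) : 1 ≤ (cs.count v : Int) := by
  have := List.count_pos_iff.mpr hv
  omega

lemma count_zero_int {cs : List Int} {v : Int} (hv : v ∉ cs) : (cs.count v : Int) = 0 := by
  simp [List.count_eq_zero.mpr hv]

lemma cond_equiv (cs : List Int) (M : Int) (ks : List Int)
    (h1 : ∀ v ∈ cs, 1 ≤ v)
    (hM1 : M ∈ cs) (hM2 : ∀ v ∈ cs, v ≤ M)
    (hnd : ks.Nodup) (hmem : ∀ v, v ∈ ks ↔ v ∈ cs) (hsort : ks.Pairwise (· ≤ ·)) :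
    ((M = 1 ∨ ((cs.count M : Int)) * M = cs.sum - 1 ∨
      (((cs.count (M - 1) : Int)) * (M - 1) + ((cs.count M : Int)) * M = cs.sum ∧
       ((cs.count M : Int)) = 1))
     ↔ (match ks with
        | [v] => v = 1 ∨ ((cs.count v : Int)) = 1
        | [a, b] => (a = 1 ∧ ((cs.count a : Int)) = 1) ∨ (b = a + 1 ∧ ((cs.count b : Int)) = 1)
        | _ => False)) := by
  match ks, hnd, hmem, hsort with
  | [], _, hmem, _ =>
    exact absurd ((hmem M).mpr hM1) (List.not_mem_nil)
  | [a], _, hmem, _ =>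
    have hall : ∀ x ∈ cs, x = a := fun x hx => by simpa using (hmem x).mpr hx
    have hMa : M = a := hall M hM1
    subst hMa
    have hac : M ∈ cs := hM1
    have ha1 : 1 ≤ M := h1 M hac
    have hFa : 1 ≤ (cs.count M : Int) := count_pos_int hac
    have hnil : cs.filter (fun x => x != M) = [] := by
      apply List.filter_eq_nil_iff.mpr
      intro x hx
      simp [hall x hx]
    have hsum : cs.sum = M * (cs.count M : Int) := by
      have := sum_decomp cs M
      rw [hnil] at this
      simpa using this
    have hFm1 : (cs.count (M - 1) : Int) = 0 := by
      apply count_zero_int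
      intro hmm
      have := hall _ hmm
      omega
    rw [hsum, hFm1]
    constructor
    · rintro (h | h | ⟨h, h2⟩)
      · exact Or.inl h
      · exfalso
        have := mul_comm (cs.count M : Int) M
        linarith
      · exact Or.inr h2
    · rintro (h | h)
      · exact Or.inl h
      · exact Or.inr (Or.inr ⟨by rw [h]; ring, h⟩)
  | [a, b], hnd, hmem, hsort =>
    have hab : a ≤ b := by
      have := List.pairwise_cons.mp hsort
      exact this.1 b List.mem_cons_self
    have hne : a ≠ b := by
      have := List.nodup_cons.mp hnd
      simpa using this.1
    have hlt : a < b := lt_of_le_of_ne hab hne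
    have hmem' : ∀ x ∈ cs, x = a ∨ x = b := fun x hx => by
      simpa using (hmem x).mpr hx
    have hac : a ∈ cs := (hmem a).mp (by simp)
    have hbc : b ∈ cs := (hmem b).mp (by simp)
    have ha1 : 1 ≤ a := h1 a hac
    have hFa : 1 ≤ (cs.count a : Int) := count_pos_int hac
    have hFb : 1 ≤ (cs.count b : Int) := count_pos_int hbc
    have hMb : M = b := by
      rcases hmem' M hM1 with h | h
      · exfalso
        have := hM2 b hbc
        omega
      · exact h
    rw [hMb]
    -- sum decomposition: cs.sum = a * count a + b * count b
    have hd1 := sum_decomp cs a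
    have hd2 := sum_decomp (cs.filter (fun x => x != a)) b
    have hcf : ((cs.filter (fun x => x != a)).count b : Int) = (cs.count b : Int) := by
      rw [count_filter_ne (fun hh => hne hh.symm)]
    have hnil : (cs.filter (fun x => x != a)).filter (fun x => x != b) = [] := by
      apply List.filter_eq_nil_iff.mpr
      intro x hx
      have hx1 := List.mem_filter.mp hx
      rcases hmem' x hx1.1 with h | h
      · exfalso; simp [h] at hx1
      · simp [h]
    rw [hnil] at hd2
    rw [hcf] at hd2
    simp only [List.sum_nil, add_zero] at hd2
    have hsum : cs.sum = a * (cs.count a : Int) + b * (cs.count b : Int) := by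
      rw [hd1, hd2]
    constructor
    · rintro (h | h | ⟨h, h2⟩)
      · omega
      · -- count b * b = sum - 1  ⇒  a * count a = 1
        have h3 : a * (cs.count a : Int) = 1 := by
          have := mul_comm (cs.count b : Int) b
          linarith
        rcases int_mul_eq_one ha1 hFa h3 with ⟨h4, h5⟩
        exact Or.inl ⟨h4, h5⟩
      · by_cases hba : a = b - 1
        · exact Or.inr ⟨by omega, h2⟩
        · exfalso
          have hbm : b - 1 ∉ cs := by
            intro hmm
            rcases hmem' _ hmm with hh | hh
            · exact hba hh.symm
            · omega
          rw [count_zero_int hbm] at h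
          have := mul_comm (cs.count b : Int) b
          nlinarith
    · rintro (⟨h4, h5⟩ | ⟨h4, h5⟩)
      · right; left
        have := mul_comm (cs.count b : Int) b
        subst h4
        linarith
      · right; right
        refine ⟨?_, h5⟩
        have hbm : (cs.count (b - 1) : Int) = (cs.count a : Int) := by
          rw [show b - 1 = a by omega]
        rw [hbm]
        have e1 := mul_comm (cs.count a : Int) a
        have e2 := mul_comm (cs.count b : Int) b
        have e3 : b - 1 = a := by omega
        rw [e3]
        linarith
  | a :: b :: c :: t, hnd, hmem, hsort =>
    have hmemA : a ∈ cs := (hmem a).mp (by simp)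
    have hmemB : b ∈ cs := (hmem b).mp (by simp)
    have hmemC : c ∈ cs := (hmem c).mp (by simp)
    have hab : a ≤ b := (List.pairwise_cons.mp hsort).1 b (by simp)
    have hbc : b ≤ c := by
      have h2 := (List.pairwise_cons.mp hsort).2
      exact (List.pairwise_cons.mp h2).1 c (by simp)
    have hnab : a ≠ b := by
      have := (List.nodup_cons.mp hnd).1
      simp at this
      exact fun hh => this.1 hh
    have hnbc : b ≠ c := by
      have := (List.nodup_cons.mp hnd).2
      have := (List.nodup_cons.mp this).1
      simp at this
      exact fun hh => this.1 hh
    have ha1 : 1 ≤ a := h1 a hmemA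
    have hlt1 : a < b := lt_of_le_of_ne hab hnab
    have hlt2 : b < c := lt_of_le_of_ne hbc hnbc
    have hcM : c ≤ M := hM2 c hmemC
    have hFa : 1 ≤ (cs.count a : Int) := count_pos_int hmemA
    have hFb : 1 ≤ (cs.count b : Int) := count_pos_int hmemB
    have hFM : 1 ≤ (cs.count M : Int) := count_pos_int hM1
    have hM3 : 3 ≤ M := by omega
    have haM : a ≠ M := by omega
    have hbM : b ≠ M := by omega
    simp only [iff_false]
    rintro (h | h | ⟨h, h2⟩)
    · omega
    · -- count M * M = sum - 1 impossible: a and b contribute ≥ 3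
      have hd1 := sum_decomp cs M
      have hd2 := sum_decomp (cs.filter (fun x => x != M)) a
      have hd3 := sum_decomp ((cs.filter (fun x => x != M)).filter (fun x => x != a)) b
      have hca : ((cs.filter (fun x => x != M)).count a : Int) = (cs.count a : Int) := by
        rw [count_filter_ne haM]
      have hcb : (((cs.filter (fun x => x != M)).filter (fun x => x != a)).count b : Int)
          = (cs.count b : Int) := by
        rw [count_filter_ne hnab.symm, count_filter_ne hbM]
      have hs3 : 0 ≤ (((cs.filter (fun x => x != M)).filter (fun x => x != a)).filter
          (fun x => x != b)).sum := by
        apply list_sum_nonneg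
        intro y hy
        have hy1 := List.mem_filter.mp hy
        have hy2 := List.mem_filter.mp hy1.1
        have hy3 := List.mem_filter.mp hy2.1
        have := h1 y hy3.1
        omega
      rw [hca] at hd2
      rw [hcb] at hd3
      have e1 := mul_comm (cs.count M : Int) M
      nlinarith
    · -- third condition impossible: a value other than M, M-1 still contributes
      obtain ⟨w, hwc, hwM, hwM1, hw1, hFw⟩ :
          ∃ w, w ∈ cs ∧ w ≠ M ∧ w ≠ M - 1 ∧ 1 ≤ w ∧ 1 ≤ (cs.count w : Int) := by
        by_cases hb1 : b = M - 1
        · exact ⟨a, hmemA, haM, by omega, ha1, hFa⟩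
        · exact ⟨b, hmemB, hbM, hb1, by omega, hFb⟩
      have hd1 := sum_decomp cs M
      have hd2 := sum_decomp (cs.filter (fun x => x != M)) (M - 1)
      have hd3 := sum_decomp ((cs.filter (fun x => x != M)).filter (fun x => x != M - 1)) w
      have hcm1 : ((cs.filter (fun x => x != M)).count (M - 1) : Int)
          = (cs.count (M - 1) : Int) := by
        rw [count_filter_ne (by omega)]
      have hcw : (((cs.filter (fun x => x != M)).filter (fun x => x != M - 1)).count w : Int)
          = (cs.count w : Int) := by
        rw [count_filter_ne hwM1, count_filter_ne hwM]
      have hs3 : 0 ≤ ((((cs.filter (fun x => x != M)).filter (fun x => x != M - 1)).filter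
          (fun x => x != w))).sum := by
        apply list_sum_nonneg
        intro y hy
        have hy1 := List.mem_filter.mp hy
        have hy2 := List.mem_filter.mp hy1.1
        have hy3 := List.mem_filter.mp hy2.1
        have := h1 y hy3.1
        omega
      have hFm1 : 0 ≤ (cs.count (M - 1) : Int) := by positivity
      rw [hcm1] at hd2
      rw [hcw] at hd3
      have e1 := mul_comm (cs.count M : Int) M
      have e2 := mul_comm (cs.count (M - 1) : Int) (M - 1)
      nlinarith

-- ----- port B characterization -----

lemma okBfun_eq (p : List Int) :
    okBfun p =
      (match PySem.List.sorted (PySem.Set.ofList (csL p)) (fun x => x) false with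
       | [v] => (v == 1) || ((FF p v) == 1)
       | [a, b] => ((a == 1) && ((FF p a) == 1)) || ((b == a + 1) && ((FF p b) == 1))
       | _ => false) := by
  have hc : p.foldl (fun d x => d.insert x (d.getD x 0 + 1)) PySem.Dict.empty
      = PySem.Dict.counter p := PySem.Dict.foldl_insert_getD_add_one_eq_counter p
  have hvals : (PySem.Dict.counter p).values = csL p := by
    rw [PySem.Dict.values_eq_map_keys _ (PySem.Dict.nodup_keys_counter p) 0,
      PySem.Dict.keys_counter]
    apply List.map_congr_left
    intro y _
    rw [PySem.Dict.getD_counter]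
  have hdist : (csL p).foldl (fun d v => d.insert v (d.getD v 0 + 1)) PySem.Dict.empty
      = PySem.Dict.counter (csL p) := PySem.Dict.foldl_insert_getD_add_one_eq_counter _
  simp only [okBfun, hc, hvals, hdist, PySem.Dict.keys_counter, PySem.Dict.getD_counter]
  rfl

lemma okBfun_iff (p : List Int) (hp : p ≠ []) :
    (okBfun p = true) ↔
      (MxL p = 1 ∨ FF p (MxL p) * MxL p = (p.length : Int) - 1 ∨
        (FF p (MxL p - 1) * (MxL p - 1) + FF p (MxL p) * MxL p = (p.length : Int) ∧
         FF p (MxL p) = 1)) := by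
  rw [okBfun_eq]
  have hperm := PySem.List.sorted_perm (PySem.Set.ofList (csL p)) (fun x => x) false
  have hnd : (PySem.List.sorted (PySem.Set.ofList (csL p)) (fun x => x) false).Nodup :=
    hperm.nodup_iff.mpr (PySem.Set.nodup_ofList _)
  have hmem : ∀ v, v ∈ PySem.List.sorted (PySem.Set.ofList (csL p)) (fun x => x) false ↔
      v ∈ csL p := by
    intro v
    rw [PySem.List.mem_sorted]
    exact PySem.Set.mem_ofList _ _
  have hsort : (PySem.List.sorted (PySem.Set.ofList (csL p)) (fun x => x) false).Pairwise
      (· ≤ ·) := PySem.List.sorted_pairwise _ _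
  have hpos : ∀ v ∈ csL p, 1 ≤ v := fun v hv => csL_pos hv
  have hM1 : MxL p ∈ csL p := MxL_mem hp
  have hM2 : ∀ v ∈ csL p, v ≤ MxL p := fun v hv => le_MxL hv
  have hiff := cond_equiv (csL p) (MxL p)
    (PySem.List.sorted (PySem.Set.ofList (csL p)) (fun x => x) false)
    hpos hM1 hM2 hnd hmem hsort
  rw [csL_sum] at hiff
  simp only [FF]
  rw [hiff]
  -- bridge the Bool match and the Prop match
  rcases PySem.List.sorted (PySem.Set.ofList (csL p)) (fun x => x) false with
    _ | ⟨v, _ | ⟨b, _ | t⟩⟩ <;> simp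

lemma alt_append (q : List Int) (x : Int) :
    maxEqualFreq_alt (q ++ [x]) =
      if okBfun (q ++ [x]) then ((q.length : Int) + 1) else maxEqualFreq_alt q := by
  rw [alt_unfold, alt_unfold]
  have hlen : (((q ++ [x]).length : Int)) = (q.length : Int) + 1 := by simp
  rw [hlen]
  rw [PySem.List.pyRange_one_succ_right (by
    have := Int.natCast_nonneg q.length
    omega : (1 : Int) ≤ (q.length : Int) + 1)]
  rw [List.foldl_append]
  have hcong : (PySem.List.pyRange 1 ((q.length : Int) + 1)).foldl
      (fun ans L => if okBfun (PySem.List.slice (q ++ [x]) none (some L)) then L else ans) 0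
      = (PySem.List.pyRange 1 ((q.length : Int) + 1)).foldl
      (fun ans L => if okBfun (PySem.List.slice q none (some L)) then L else ans) 0 := by
    apply PySem.List.foldl_congr_mem
    intro acc L hL
    have hLb := PySem.List.mem_pyRange_one.mp hL
    have h0 : (0 : Int) ≤ L := by omega
    have e : PySem.List.slice (q ++ [x]) none (some L) = PySem.List.slice q none (some L) := by
      rw [PySem.List.slice_to _ h0, PySem.List.slice_to _ h0]
      exact List.take_append_of_le_length (by omega)
    rw [e]
  rw [hcong]
  have hfull : PySem.List.slice (q ++ [x]) none (some ((q.length : Int) + 1)) = q ++ [x] := by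
    rw [PySem.List.slice_to _ (by have := Int.natCast_nonneg q.length; omega)]
    apply List.take_of_length_le
    simp
  simp only [List.foldl_cons, List.foldl_nil, hfull]

lemma foldl_sel_le (l : List Int) (g : Int → Bool) (m : Int) :
    ∀ init, init ≤ m → (∀ L ∈ l, L ≤ m) →
      l.foldl (fun ans L => if g L then L else ans) init ≤ m := by
  induction l with
  | nil => intro init h _; simpa using h
  | cons b l ih =>
    intro init h hall
    simp only [List.foldl_cons]
    apply ih
    · split
      · exact hall b List.mem_cons_self
      · exact h
    · exact fun L hL => hall L (List.mem_cons_of_mem _ hL)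

lemma alt_le (q : List Int) : maxEqualFreq_alt q ≤ (q.length : Int) := by
  rw [alt_unfold]
  apply foldl_sel_le _ (fun L => okBfun (PySem.List.slice q none (some L))) _ 0
    (Int.natCast_nonneg _)
  intro L hL
  have := PySem.List.mem_pyRange_one.mp hL
  omega

-- ----- the main invariant -----

lemma runA_append (q : List Int) (x : Int) :
    runA (q ++ [x]) = stepA (runA q) ((q.length : Int), x) := by
  unfold runA
  rw [PySem.List.enumerate_append, List.foldl_append]
  simp [PySem.List.enumerate_cons, PySem.List.enumerate_nil]

lemma runA_inv (q : List Int) :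
    (∀ k, (runA q).1.getD k 0 = cntI q k) ∧
    (∀ v, (runA q).2.1.getD v 0 = FF q v) ∧
    (runA q).2.2.1 = MxL q ∧
    (runA q).2.2.2 = maxEqualFreq_alt q := by
  induction q using List.reverseRecOn with
  | nil =>
    refine ⟨?_, ?_, ?_, ?_⟩
    · intro k
      simp [runA, PySem.List.enumerate, PySem.Dict.getD_empty, cntI]
    · intro v
      simp [runA, PySem.List.enumerate, PySem.Dict.getD_empty, FF, csL, PySem.Set.ofList]
    · simp [runA, PySem.List.enumerate, MxL, csL, PySem.Set.ofList]
    · rw [alt_unfold]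
      simp only [runA, PySem.List.enumerate, List.foldl_nil]
      rw [show ((List.length ([] : List Int) : Int) + 1) = 1 by simp,
        PySem.List.pyRange_one_eq_nil (by norm_num)]
      rfl
  | append_singleton q x ih =>
    obtain ⟨ihc, ihf, ihm, iha⟩ := ih
    have hne : q ++ [x] ≠ [] := by simp
    have hc0 : 0 ≤ cntI q x := cntI_nonneg q x
    have hmem0 : cntI q x ≠ 0 ↔ x ∈ q := cntI_ne_zero_iff q x
    rw [runA_append]
    simp only [stepA, PySem.Dict.getD_modify_self, ihc, ihf, ihm, iha]
    -- the four components
    have hcount : ∀ k, (((runA q).1.modify x 0 (· + 1)).getD k 0) = cntI (q ++ [x]) k := by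
      intro k
      rw [PySem.Dict.getD_modify, cntI_append]
      split
      · subst ‹k = x›; rw [ihc]
      · rw [ihc]; simp [‹¬ k = x›]
    have hfreq : ∀ v,
        (((if cntI q x ≠ 0 then (runA q).2.1.modify (cntI q x) 0 (· - 1)
           else (runA q).2.1).modify (cntI q x + 1) 0 (· + 1)).getD v 0) = FF (q ++ [x]) v := by
      intro v
      rw [FF_append]
      by_cases hx : cntI q x ≠ 0
      · have hxq : x ∈ q := hmem0.mp hx
        rw [if_pos hx]
        simp only [PySem.Dict.getD_modify, ihf]
        have hne2 : ¬ (cntI q x + 1 = cntI q x) := by omega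
        by_cases h1 : v = cntI q x + 1 <;> by_cases h2 : v = cntI q x <;>
          simp [h1, h2, hxq, hne2] <;> omega
      · have hxq : x ∉ q := fun hh => hx (hmem0.mpr hh)
        rw [if_neg hx]
        simp only [PySem.Dict.getD_modify, ihf]
        have hc00 : cntI q x = 0 := by omega
        by_cases h1 : v = cntI q x + 1 <;> simp [h1, hxq, hc00] <;> omega
    have hmax : max (MxL q) (cntI q x + 1) = MxL (q ++ [x]) := (MxL_append q x).symm
    refine ⟨hcount, ?_, ?_, ?_⟩
    · intro v
      exact hfreq v
    · exact hmax
    · -- the answer component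
      have hlen2 : (((q ++ [x]).length : Int)) = (q.length : Int) + 1 := by simp
      have hcond : (max (MxL q) (cntI q x + 1) = 1 ∨
          (((if cntI q x ≠ 0 then (runA q).2.1.modify (cntI q x) 0 (· - 1)
             else (runA q).2.1).modify (cntI q x + 1) 0 (· + 1)).getD
               (max (MxL q) (cntI q x + 1)) 0) * max (MxL q) (cntI q x + 1) = (q.length : Int) ∨
          ((((if cntI q x ≠ 0 then (runA q).2.1.modify (cntI q x) 0 (· - 1)
             else (runA q).2.1).modify (cntI q x + 1) 0 (· + 1)).getD
               (max (MxL q) (cntI q x + 1) - 1) 0) * (max (MxL q) (cntI q x + 1) - 1) +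
           (((if cntI q x ≠ 0 then (runA q).2.1.modify (cntI q x) 0 (· - 1)
             else (runA q).2.1).modify (cntI q x + 1) 0 (· + 1)).getD
               (max (MxL q) (cntI q x + 1)) 0) * max (MxL q) (cntI q x + 1) = (q.length : Int) + 1 ∧
           (((if cntI q x ≠ 0 then (runA q).2.1.modify (cntI q x) 0 (· - 1)
             else (runA q).2.1).modify (cntI q x + 1) 0 (· + 1)).getD
               (max (MxL q) (cntI q x + 1)) 0) = 1))
          ↔ (okBfun (q ++ [x]) = true) := by
        rw [okBfun_iff _ hne, hlen2]
        rw [hfreq, hfreq, hmax]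
        have e : (q.length : Int) + 1 - 1 = (q.length : Int) := by ring
        rw [e]
      rw [alt_append]
      by_cases hok : okBfun (q ++ [x]) = true
      · rw [if_pos (hcond.mpr hok)]
        simp only [hok, if_true]
        have h1 : maxEqualFreq_alt q ≤ (q.length : Int) := alt_le q
        omega
      · rw [if_neg (fun hh => hok (hcond.mp hh))]
        simp [hok]

theorem maxEqualFreq_main : ∀ (nums : List Int), maxEqualFreq nums = maxEqualFreq_alt nums := by
  intro nums
  rw [maxEqualFreq_eq_runA]
  exact (runA_inv nums).2.2.2

-- ===== VERDICT (by name: the statement is the Claim_ definition above) =====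
theorem maxEqualFreq_spec : Claim_equal_maxEqualFreq := by
  intro nums _
  unfold Spec_maxEqualFreq
  exact maxEqualFreq_main nums
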